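-- pv_equiv track=rewrite | github.com/poohpoom2002/OOD | Lab-3_5.py | lookAtTree
-- ===== SOURCE A (Python) =====
-- class Stack:
--     def __init__(self):
--         self.items = []
--
--     def push(self, item):
--         self.items.append(item)
--
--     def pop(self):
--         if not self.isEmpty():
--             return self.items.pop()
--
--     def peek(self):
--         if not self.isEmpty():
--             return self.items[-1]
--
--     def isEmpty(self):
--         return self.size() == 0
--
--     def size(self):
--         return len(self.items)
--
--     def elements(self):
--         return self.items
--
--     def treePop(self, height):
--         for i in range(len(self.elements()) - 1, -1, -1):
--             if height >= self.items[i]: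
--                 self.pop()
--
-- def lookAtTree(treeHeights):
--     stack = Stack()
--     for tree in treeHeights:
--         if not stack.isEmpty():
--             if tree >= stack.peek():
--                 stack.treePop(tree)
--         stack.push(tree)
--     return stack.size()
-- ===== SOURCE B (Python) =====
-- def lookAtTree(treeHeights):
--     # One reverse pass: count elements strictly taller than everything after them
--     # (the strict suffix maxima), which is exactly what remains on A's stack.
--     count = 0
--     tallest = None
--     for h in reversed(treeHeights):
--         if tallest is None or h > tallest:
--             count += 1
--             tallest = h
--     return count
-- ===== Notes on version B (the rewrite author's own statement) =====
-- stated objective: faster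
-- what changed: Replaced the stack with its quirky full-stack treePop rescans by a single reverse pass keeping a running maximum, counting strict suffix maxima directly.
import Mathlib
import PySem

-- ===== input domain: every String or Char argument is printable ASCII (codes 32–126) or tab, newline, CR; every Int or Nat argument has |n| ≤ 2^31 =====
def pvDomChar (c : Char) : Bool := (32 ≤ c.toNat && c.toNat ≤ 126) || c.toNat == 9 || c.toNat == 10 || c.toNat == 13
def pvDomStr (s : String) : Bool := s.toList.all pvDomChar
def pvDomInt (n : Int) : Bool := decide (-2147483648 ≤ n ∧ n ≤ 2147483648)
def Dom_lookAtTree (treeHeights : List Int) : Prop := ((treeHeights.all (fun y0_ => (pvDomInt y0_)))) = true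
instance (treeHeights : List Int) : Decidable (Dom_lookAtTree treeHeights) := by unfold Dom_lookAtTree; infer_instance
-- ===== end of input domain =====

-- B replaces A's stack (with its full-stack treePop rescans) by one reverse pass with a
-- running maximum counting strict suffix maxima; objective: faster.

-- ===== PORT A =====
-- Stack.treePop: for i in range(len(items)-1, -1, -1): if height >= items[i]: pop last.
-- items[i] is always in range here (i decreases by 1 each step, length by at most 1),
-- so the 'none' branch of pyGet? is unreachable and leaves the state unchanged.
def treePopA (height : Int) (items : List Int) : List Int :=
  (PySem.List.pyRange ((items.length : Int) - 1) (-1) (-1)).foldl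
    (fun s i =>
      match PySem.List.pyGet? s i with
      | some v =>
          if height ≥ v then
            -- self.pop(): if not empty, remove the last element
            if s.isEmpty then s else
              match PySem.List.pop? s (-1) with
              | some (_, rest) => rest
              | none => s
          else s
      | none => s)
    items

-- loop body of lookAtTree
def stepA (s : List Int) (tree : Int) : List Int :=
  (if ¬ s.isEmpty then
     match PySem.List.pyGet? s (-1) with        -- stack.peek() = items[-1]
     | some top => if tree ≥ top then treePopA tree s else s
     | none => s                                 -- unreachable: s nonempty
   else s) ++ [tree]                             -- stack.push(tree)

def lookAtTree (treeHeights : List Int) : Int :=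
  ((treeHeights.foldl stepA []).length : Int)    -- stack.size()

-- ===== PORT B =====
-- loop body: state = (count, tallest so far)
def stepB (st : Int × Option Int) (h : Int) : Int × Option Int :=
  match st.2 with
  | none => (st.1 + 1, some h)
  | some t => if h > t then (st.1 + 1, some h) else st

def lookAtTree_alt (treeHeights : List Int) : Int :=
  (treeHeights.reverse.foldl stepB (0, none)).1

-- ===== PRECONDITION & SPEC =====
def Spec_lookAtTree (treeHeights : List Int) (out : Int) : Prop := out = lookAtTree_alt treeHeights
instance (treeHeights : List Int) (out : Int) : Decidable (Spec_lookAtTree treeHeights out) := by unfold Spec_lookAtTree; infer_instance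

-- ===== CLAIM (what is proved, stated in full; the proofs are below) =====
def Claim_equal_lookAtTree : Prop := ∀ (treeHeights : List Int), Dom_lookAtTree treeHeights → Spec_lookAtTree treeHeights (lookAtTree treeHeights)

-- ===== LEMMAS AND PROOFS =====

-- reference value: number of strict suffix maxima
def smCount : List Int → Int
  | [] => 0
  | x :: xs => smCount xs + (if xs.all (fun y => decide (y < x)) then 1 else 0)

def maxO : List Int → Option Int
  | [] => none
  | x :: xs => match maxO xs with | none => some x | some m => some (max x m)

theorem maxO_eq_none_iff (xs : List Int) : maxO xs = none ↔ xs = [] := by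
  cases xs with
  | nil => simp [maxO]
  | cons x xs => simp [maxO]; cases maxO xs <;> simp

theorem maxO_spec (xs : List Int) (m : Int) (h : maxO xs = some m) :
    ∀ y ∈ xs, y ≤ m := by
  induction xs generalizing m with
  | nil => simp [maxO] at h
  | cons x xs ih =>
    intro y hy
    simp [maxO] at h
    cases hmo : maxO xs with
    | none =>
      rw [hmo] at h
      have : xs = [] := (maxO_eq_none_iff xs).mp hmo
      subst this; simp at hy; simp at h; omega
    | some m' =>
      rw [hmo] at h; simp at h
      rcases List.mem_cons.mp hy with rfl | hy'
      · omega
      · have := ih m' hmo y hy'; omega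

theorem maxO_mem (xs : List Int) (m : Int) (h : maxO xs = some m) : m ∈ xs := by
  induction xs generalizing m with
  | nil => simp [maxO] at h
  | cons x xs ih =>
    simp [maxO] at h
    cases hmo : maxO xs with
    | none => rw [hmo] at h; simp at h; simp [h]
    | some m' =>
      rw [hmo] at h; simp at h
      rcases max_cases x m' with ⟨he, _⟩ | ⟨he, _⟩
      · have : m = x := by omega
        simp [this]
      · have : m = m' := by omega
        subst this
        exact List.mem_cons_of_mem _ (ih _ hmo)

-- B computes smCount
theorem altB_char (xs : List Int) :
    xs.reverse.foldl stepB (0, none) = (smCount xs, maxO xs) := by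
  induction xs with
  | nil => simp [smCount, maxO]
  | cons x xs ih =>
    have : (x :: xs).reverse = xs.reverse ++ [x] := by simp
    rw [this, List.foldl_append, ih]
    cases hmo : maxO xs with
    | none =>
      have hnil : xs = [] := (maxO_eq_none_iff xs).mp hmo
      subst hnil
      simp [stepB, smCount, maxO]
    | some m =>
      have hall : (xs.all (fun y => decide (y < x)) = true) ↔ m < x := by
        constructor
        · intro h; exact (by simpa using (List.all_eq_true.mp h) m (maxO_mem xs m hmo))
        · intro h; exact List.all_eq_true.mpr (fun y hy => by
            simp at hy ⊢
            calc y ≤ m := maxO_spec xs m hmo y hy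
              _ < x := h)
      by_cases hx : x > m
      · simp [stepB, hmo, hx, smCount, maxO, hall.mpr hx, max_eq_left (le_of_lt hx)]
      · have : ¬ (xs.all (fun y => decide (y < x)) = true) := by
          intro hc; exact hx (hall.mp hc)
        simp [stepB, hmo, hx, smCount, maxO, this, max_eq_right (by omega : x ≤ m)]

-- if every stacked element beats height, the treePop scan does nothing
theorem treePop_noop_fold (height : Int) (L : List Int) (s : List Int)
    (h : ∀ v ∈ s, height < v) :
    L.foldl (fun s i =>
      match PySem.List.pyGet? s i with
      | some v =>
          if height ≥ v then
            if s.isEmpty then s else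
              match PySem.List.pop? s (-1) with
              | some (_, rest) => rest
              | none => s
          else s
      | none => s) s = s := by
  induction L with
  | nil => rfl
  | cons i L ih =>
    have hstep : (match PySem.List.pyGet? s i with
      | some v =>
          if height ≥ v then
            if s.isEmpty then s else
              match PySem.List.pop? s (-1) with
              | some (_, rest) => rest
              | none => s
          else s
      | none => s) = s := by
      cases hg : PySem.List.pyGet? s i with
      | none => rfl
      | some v =>
        have hv : v ∈ s := PySem.List.mem_of_pyGet?_eq_some s hg
        have : ¬ height ≥ v := by have := h v hv; omega
        simp [this]
    rw [List.foldl_cons, hstep, ih]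

theorem pairwise_gt_last (s : List Int) (hp : s.Pairwise (· > ·)) (hne : s ≠ [])
    (v : Int) (hv : v ∈ s) : s.getLast hne ≤ v := by
  induction s with
  | nil => exact absurd rfl hne
  | cons x xs ih =>
    cases xs with
    | nil => simp at hv; simp [hv]
    | cons y ys =>
      rw [List.getLast_cons (by simp)]
      rcases List.mem_cons.mp hv with rfl | hv'
      · have hx : ∀ u ∈ y :: ys, v > u := (List.pairwise_cons.mp hp).1
        have := hx _ (List.getLast_mem (by simp))
        omega
      · exact ih (List.pairwise_cons.mp hp).2 (by simp) hv'

-- the scan of treePop, on a strictly decreasing stack, is exactly a filter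
theorem treePopA_char (height : Int) (s : List Int) (hp : s.Pairwise (· > ·)) :
    treePopA height s = s.filter (fun v => decide (height < v)) := by
  induction s using List.reverseRecOn with
  | nil =>
    simp [treePopA, PySem.List.pyRange_neg_one_eq_nil (by omega : (-1 : Int) ≤ -1)]
  | append_singleton ys v ih =>
    have hlen : ((ys ++ [v]).length : Int) - 1 = (ys.length : Int) := by simp
    have hcons := PySem.List.pyRange_neg_one_cons (a := (ys.length : Int)) (b := -1)
      (by omega)
    unfold treePopA
    rw [hlen, hcons, List.foldl_cons]
    have hget : PySem.List.pyGet? (ys ++ [v]) (ys.length : Int) = some v := by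
      have h1 := PySem.List.pyGet?_eq_some_getElem (ys ++ [v]) (i := (ys.length : Int))
        (by omega) (by simp)
      rw [h1]
      congr 1
      simp
    rw [hget]
    have hpy : ys.Pairwise (· > ·) := (List.pairwise_append.mp hp).1
    have hyv : ∀ u ∈ ys, u > v := by
      intro u hu
      exact (List.pairwise_append.mp hp).2.2 u hu v (by simp)
    by_cases hc : height ≥ v
    · have hpop : PySem.List.pop? (ys ++ [v]) (-1) = some (v, ys) := by
        have := PySem.List.pop?_last (xs := ys) (x := v)
        simpa using this
      simp only [hc, if_true, hpop]
      have hne : (ys ++ [v]).isEmpty = false := by simp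
      rw [hne]
      simp only [Bool.false_eq_true, if_false]
      have : ((ys.length : Int)) - 1 = ((ys.length : Int)) - 1 := rfl
      rw [show PySem.List.pyRange ((ys.length : Int) - 1) (-1) (-1)
            = PySem.List.pyRange (((ys).length : Int) - 1) (-1) (-1) from rfl]
      have := ih hpy
      unfold treePopA at this
      rw [this]
      rw [List.filter_append]
      simp [show ¬ height < v by omega]
    · simp only [hc, if_false]
      have hall : ∀ u ∈ ys ++ [v], height < u := by
        intro u hu
        rcases List.mem_append.mp hu with h1 | h1
        · have := hyv u h1; omega
        · simp at h1; omega
      rw [treePop_noop_fold height _ _ hall]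
      rw [List.filter_eq_self.mpr (fun u hu => by simpa using hall u hu)]

-- one iteration of A's main loop, on a strictly decreasing stack
theorem stepA_char (s : List Int) (tree : Int) (hp : s.Pairwise (· > ·)) :
    stepA s tree = s.filter (fun v => decide (tree < v)) ++ [tree] := by
  unfold stepA
  cases s with
  | nil => simp
  | cons x xs =>
    have hne : ((x :: xs).isEmpty) = false := by simp
    rw [hne]
    simp only [Bool.false_eq_true, not_false_iff, if_true]
    have hget : PySem.List.pyGet? (x :: xs) (-1) = some ((x :: xs).getLast (by simp)) := by
      rw [PySem.List.pyGet?_neg_one]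
      exact List.getLast?_eq_some_getLast _
    rw [hget]
    set g := (x :: xs).getLast (by simp) with hg
    by_cases hc : tree ≥ g
    · simp only [hc, if_true]
      rw [treePopA_char tree _ hp]
    · simp only [hc, if_false]
      have : (x :: xs).filter (fun v => decide (tree < v)) = x :: xs := by
        apply List.filter_eq_self.mpr
        intro u hu
        have := pairwise_gt_last (x :: xs) hp (by simp) u hu
        simp; omega
      rw [this]

theorem step_pairwise (s : List Int) (tree : Int) (hp : s.Pairwise (· > ·)) :
    (s.filter (fun v => decide (tree < v)) ++ [tree]).Pairwise (· > ·) := by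
  rw [List.pairwise_append]
  refine ⟨hp.filter _, by simp, ?_⟩
  intro a ha b hb
  simp at hb; subst hb
  have := List.of_mem_filter ha
  simpa using this

-- main invariant of A's loop
theorem loopA_char (xs : List Int) : ∀ (s : List Int), s.Pairwise (· > ·) →
    ((xs.foldl stepA s).length : Int)
      = ((s.filter (fun v => xs.all (fun y => decide (y < v)))).length : Int) + smCount xs := by
  induction xs with
  | nil => intro s hp; simp [smCount]
  | cons x xs ih =>
    intro s hp
    rw [List.foldl_cons, stepA_char s x hp,
        ih _ (step_pairwise s x hp)]
    rw [List.filter_append, List.filter_filter]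
    have hsing : [x].filter (fun v => xs.all (fun y => decide (y < v)))
        = if xs.all (fun y => decide (y < x)) then [x] else [] := by
      by_cases h : xs.all (fun y => decide (y < x)) <;> simp [h]
    rw [hsing]
    have : s.filter (fun a => xs.all (fun y => decide (y < a)) && decide (x < a))
        = s.filter (fun v => (x :: xs).all (fun y => decide (y < v))) := by
      apply List.filter_congr
      intro v _
      simp [List.all_cons, Bool.and_comm]
    rw [this]
    simp only [smCount]
    by_cases h : xs.all (fun y => decide (y < x)) <;> simp [h] <;> ring

-- ===== VERDICT (by name: the statement is the Claim_ definition above) =====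
theorem lookAtTree_spec : Claim_equal_lookAtTree := by
  intro treeHeights _
  unfold Spec_lookAtTree lookAtTree lookAtTree_alt
  rw [altB_char]
  have := loopA_char treeHeights [] (by simp)
  simpa using this
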